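-- pv_equiv track=rewrite | github.com/tsenoner/into_the_unknown | into_the_unknown/prepare_data/1_parse_file.py | extract_cross_references
-- ===== SOURCE A (Python) =====
-- from typing import Dict, List, Set, Tuple
--
-- def extract_cross_references(
--     entry: Dict, cross_references: List[str]
-- ) -> Dict[str, str]:
--     cross_references_data = {xref: [] for xref in cross_references}
--     for xref in cross_references:
--         xref_ids = [
--             reference["id"]
--             for reference in entry.get("uniProtKBCrossReferences", [])
--             if reference["database"] == xref
--         ]
--         cross_references_data[xref] = ", ".join(xref_ids)
--     return cross_references_data
-- ===== SOURCE B (Python) =====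
-- def extract_cross_references(entry, cross_references):
--     # One pass over the references, accumulating each database's joined id string
--     # incrementally; then read the result off per requested database.
--     wanted = set(cross_references)
--     joined = {}
--     for reference in entry.get("uniProtKBCrossReferences", []):
--         db = reference.get("database")
--         if db in wanted:
--             rid = reference["id"]
--             prev = joined.get(db)
--             joined[db] = rid if prev is None else prev + ", " + rid
--     return {xref: joined.get(xref, "") for xref in cross_references}
-- ===== Notes on version B (the rewrite author's own statement) =====
-- stated objective: faster
-- what changed: Replaces A's per-database rescan of all references (a full pass over the reference list for every requested database, joining at the end) by a single pass over the references that incrementally concatenates each wanted database's id string, followed by one lookup per requested database.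
import Mathlib
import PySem

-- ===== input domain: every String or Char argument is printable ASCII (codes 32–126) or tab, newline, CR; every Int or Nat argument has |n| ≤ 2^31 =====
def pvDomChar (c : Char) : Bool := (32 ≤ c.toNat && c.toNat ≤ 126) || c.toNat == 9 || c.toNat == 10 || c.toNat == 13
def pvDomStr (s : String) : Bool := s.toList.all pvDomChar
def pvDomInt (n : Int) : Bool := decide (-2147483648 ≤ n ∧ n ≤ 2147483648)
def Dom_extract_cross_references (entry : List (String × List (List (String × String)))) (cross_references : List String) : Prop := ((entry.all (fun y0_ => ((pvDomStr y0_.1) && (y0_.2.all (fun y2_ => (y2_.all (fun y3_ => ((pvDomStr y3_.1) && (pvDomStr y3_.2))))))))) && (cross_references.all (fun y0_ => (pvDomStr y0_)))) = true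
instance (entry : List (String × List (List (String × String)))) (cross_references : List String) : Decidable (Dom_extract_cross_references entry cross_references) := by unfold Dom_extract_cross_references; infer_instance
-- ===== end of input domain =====

-- B replaces A's per-database rescan of all references by ONE pass that, for each wanted
-- database, concatenates its id string incrementally (objective: faster, O(m+n) vs O(m·n)).

-- ===== PORT A =====
def extract_cross_references (entry : List (String × List (List (String × String)))) (cross_references : List String) : List (String × String) :=
  -- entry.get("uniProtKBCrossReferences", [])
  let refs := ((PySem.Dict.mk entry).get? "uniProtKBCrossReferences").getD []
  -- cross_references_data = {xref: [] for xref in cross_references}; the list placeholder is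
  -- always overwritten by the loop below, so it is transliterated with "" as the placeholder value
  let data : PySem.Dict String String :=
    cross_references.foldl (fun d xref => d.insert xref "") PySem.Dict.empty
  -- for xref in cross_references: cross_references_data[xref] = ", ".join(xref_ids)
  let data :=
    cross_references.foldl (fun d xref =>
      -- xref_ids = [reference["id"] for reference in refs if reference["database"] == xref]
      -- reference["database"] / reference["id"] raise KeyError where get? is none: Pre_ excludes that
      let xref_ids :=
        (refs.filter (fun r => (PySem.Dict.mk r).get? "database" == some xref)).map
          (fun r => ((PySem.Dict.mk r).get? "id").getD "")
      d.insert xref (PySem.Str.join ", " xref_ids)) data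
  data.items

-- ===== PORT B =====
def extract_cross_references_alt (entry : List (String × List (List (String × String)))) (cross_references : List String) : List (String × String) :=
  let refs := ((PySem.Dict.mk entry).get? "uniProtKBCrossReferences").getD []
  -- wanted = set(cross_references)
  let wanted := PySem.Set.ofList cross_references
  -- for reference in refs: db = reference.get("database");
  --   if db in wanted: rid = reference["id"]; prev = joined.get(db);
  --     joined[db] = rid if prev is None else prev + ", " + rid
  -- (db = None is never in the set of strings, so the none branch skips)
  let joined : PySem.Dict String String :=
    refs.foldl (fun j r =>
      match (PySem.Dict.mk r).get? "database" with
      | none => j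
      | some db =>
        if PySem.Set.contains wanted db then
          let rid := ((PySem.Dict.mk r).get? "id").getD ""
          match j.get? db with
          | none => j.insert db rid
          | some prev => j.insert db (prev ++ ", " ++ rid)
        else j) PySem.Dict.empty
  -- return {xref: joined.get(xref, "") for xref in cross_references}
  (cross_references.foldl (fun out xref => out.insert xref (joined.getD xref "")) PySem.Dict.empty).items

-- ===== PRECONDITION & SPEC =====
-- Pre_ excludes exactly the inputs where Python A raises KeyError: a reference missing "database"
-- while cross_references is non-empty, or a reference whose database is requested missing "id".
def Pre_extract_cross_references (entry : List (String × List (List (String × String)))) (cross_references : List String) : Prop :=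
  ∀ r ∈ ((PySem.Dict.mk entry).get? "uniProtKBCrossReferences").getD [],
    (cross_references ≠ [] → ((PySem.Dict.mk r).get? "database").isSome = true) ∧
    (∀ db, (PySem.Dict.mk r).get? "database" = some db → db ∈ cross_references →
      ((PySem.Dict.mk r).get? "id").isSome = true)
instance (entry : List (String × List (List (String × String)))) (cross_references : List String) : Decidable (Pre_extract_cross_references entry cross_references) := by unfold Pre_extract_cross_references; infer_instance
def pvWitness_extract_cross_references : (List (String × List (List (String × String)))) × List String :=
  ([("uniProtKBCrossReferences", [[("database", "PDB"), ("id", "1ABC")], [("database", "Pfam"), ("id", "PF01")]])], ["PDB", "Pfam", "KEGG"])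

def Spec_extract_cross_references (entry : List (String × List (List (String × String)))) (cross_references : List String) (out : List (String × String)) : Prop := out = extract_cross_references_alt entry cross_references
instance (entry : List (String × List (List (String × String)))) (cross_references : List String) (out : List (String × String)) : Decidable (Spec_extract_cross_references entry cross_references out) := by unfold Spec_extract_cross_references; infer_instance

-- ===== CLAIM (what is proved, stated in full; the proofs are below) =====
def Claim_equal_extract_cross_references : Prop := ∀ (entry : List (String × List (List (String × String)))) (cross_references : List String), Dom_extract_cross_references entry cross_references → Pre_extract_cross_references entry cross_references → Spec_extract_cross_references entry cross_references (extract_cross_references entry cross_references)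

-- ===== LEMMAS AND PROOFS =====

-- getD after a fold of key-indexed inserts: unchanged for a key not in the list …
theorem pv_getD_foldl_insert_of_not_mem {ν : Type} (l : List String) (v : String → ν)
    (d : PySem.Dict String ν) (x : String) (d0 : ν) (h : x ∉ l) :
    (l.foldl (fun d y => d.insert y (v y)) d).getD x d0 = d.getD x d0 := by
  induction l generalizing d with
  | nil => rfl
  | cons y t ih =>
    simp only [List.foldl_cons]
    rw [ih _ (by simp_all), PySem.Dict.getD_insert]
    simp_all

-- … and equal to the (key-only) inserted value for a key in the list
theorem pv_getD_foldl_insert_of_mem {ν : Type} (l : List String) (v : String → ν)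
    (d : PySem.Dict String ν) (x : String) (d0 : ν) (h : x ∈ l) :
    (l.foldl (fun d y => d.insert y (v y)) d).getD x d0 = v x := by
  induction l generalizing d with
  | nil => simp at h
  | cons y t ih =>
    simp only [List.foldl_cons]
    by_cases hxt : x ∈ t
    · exact ih _ hxt
    · have hxy : x = y := by
        rcases List.mem_cons.mp h with h | h
        · exact h
        · exact absurd h hxt
      subst hxy
      rw [pv_getD_foldl_insert_of_not_mem t v _ x d0 hxt, PySem.Dict.getD_insert, if_pos rfl]

-- updating a set with its own generating list is the identity
theorem pv_set_update_self (crs : List String) :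
    PySem.Set.update (PySem.Set.ofList crs) crs = PySem.Set.ofList crs := by
  rw [PySem.Set.update_eq_append_filter]
  have h : (PySem.Set.ofList crs).filter (fun y => !(PySem.Set.contains (PySem.Set.ofList crs) y)) = [] := by
    simp [List.filter_eq_nil_iff]
  rw [h, List.append_nil]

-- a fold of key-indexed inserts from empty, as an items list
theorem pv_items_foldl_insert {ν : Type} [Inhabited ν] (crs : List String) (v : String → ν) :
    (crs.foldl (fun d xref => d.insert xref (v xref)) (PySem.Dict.empty : PySem.Dict String ν)).items
    = (PySem.Set.ofList crs).map (fun x => (x, v x)) := by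
  have hkeys : (crs.foldl (fun d xref => d.insert xref (v xref)) (PySem.Dict.empty : PySem.Dict String ν)).keys = PySem.Set.ofList crs := by
    rw [PySem.Dict.keys_foldl_insert (f := fun _ xref => v xref)]
    rw [PySem.Dict.keys_empty, PySem.Set.update_nil_left]
  have hnd : (crs.foldl (fun d xref => d.insert xref (v xref)) (PySem.Dict.empty : PySem.Dict String ν)).keys.Nodup := by
    rw [hkeys]; exact PySem.Set.nodup_ofList crs
  rw [PySem.Dict.items_eq_map_keys _ hnd default, hkeys]
  apply List.map_congr_left
  intro x hx
  rw [pv_getD_foldl_insert_of_mem crs v _ x default ((PySem.Set.mem_ofList crs x).mp hx)]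

-- A's result, closed form: one item per distinct requested database, ids by filter-and-map
theorem pv_A_items (refs : List (List (String × String))) (crs : List String) :
    (crs.foldl (fun d xref =>
        d.insert xref (PySem.Str.join ", "
          ((refs.filter (fun r => (PySem.Dict.mk r).get? "database" == some xref)).map
            (fun r => ((PySem.Dict.mk r).get? "id").getD ""))))
      (crs.foldl (fun d xref => d.insert xref "") PySem.Dict.empty)).items
    = (PySem.Set.ofList crs).map (fun x => (x, PySem.Str.join ", "
        ((refs.filter (fun r => (PySem.Dict.mk r).get? "database" == some x)).map
          (fun r => ((PySem.Dict.mk r).get? "id").getD "")))) := by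
  have hk0 : (crs.foldl (fun d xref => d.insert xref "") (PySem.Dict.empty : PySem.Dict String String)).keys = PySem.Set.ofList crs := by
    rw [PySem.Dict.keys_foldl_insert (f := fun _ xref => "")]
    rw [PySem.Dict.keys_empty, PySem.Set.update_nil_left]
  have hkeys : (crs.foldl (fun d xref =>
        d.insert xref (PySem.Str.join ", "
          ((refs.filter (fun r => (PySem.Dict.mk r).get? "database" == some xref)).map
            (fun r => ((PySem.Dict.mk r).get? "id").getD ""))))
      (crs.foldl (fun d xref => d.insert xref "") PySem.Dict.empty)).keys = PySem.Set.ofList crs := by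
    rw [PySem.Dict.keys_foldl_insert (f := fun _ xref => PySem.Str.join ", "
          ((refs.filter (fun r => (PySem.Dict.mk r).get? "database" == some xref)).map
            (fun r => ((PySem.Dict.mk r).get? "id").getD ""))), hk0, pv_set_update_self]
  have hnd : (crs.foldl (fun d xref =>
        d.insert xref (PySem.Str.join ", "
          ((refs.filter (fun r => (PySem.Dict.mk r).get? "database" == some xref)).map
            (fun r => ((PySem.Dict.mk r).get? "id").getD ""))))
      (crs.foldl (fun d xref => d.insert xref "") PySem.Dict.empty)).keys.Nodup := by
    rw [hkeys]; exact PySem.Set.nodup_ofList crs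
  rw [PySem.Dict.items_eq_map_keys _ hnd "", hkeys]
  apply List.map_congr_left
  intro x hx
  have hxc : x ∈ crs := (PySem.Set.mem_ofList crs x).mp hx
  rw [pv_getD_foldl_insert_of_mem crs
    (fun xref => PySem.Str.join ", "
      ((refs.filter (fun r => (PySem.Dict.mk r).get? "database" == some xref)).map
        (fun r => ((PySem.Dict.mk r).get? "id").getD ""))) _ x "" hxc]

-- string concatenation through String.ofList
theorem pv_cat (s x : String) : s ++ ", " ++ x = String.ofList (s.toList ++ [',', ' '] ++ x.toList) := by
  rw [String.ofList_append, String.ofList_append, String.ofList_toList, String.ofList_toList]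

-- ", ".join over a non-empty list is a left fold of "prev + ', ' + next"
theorem pv_join_cons (s : String) (l : List String) :
    PySem.Str.join ", " (s :: l) = l.foldl (fun a x => a ++ ", " ++ x) s := by
  induction l generalizing s with
  | nil =>
    show String.ofList (PySem.Chars.join [',', ' '] [s.toList]) = s
    rw [PySem.Chars.join_singleton, String.ofList_toList]
  | cons x t ih =>
    show String.ofList (PySem.Chars.join [',', ' '] (s.toList :: x.toList :: t.map String.toList))
      = ((x :: t).foldl (fun a x => a ++ ", " ++ x) s)
    rw [PySem.Chars.join_cons_cons, List.foldl_cons]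
    have hx : s.toList ++ [',', ' '] ++ x.toList = (s ++ ", " ++ x).toList := by
      rw [pv_cat s x, String.toList_ofList]
    have := ih (s ++ ", " ++ x)
    rw [← this]
    show String.ofList (s.toList ++ [',', ' '] ++ PySem.Chars.join [',', ' '] (x.toList :: t.map String.toList))
      = String.ofList (PySem.Chars.join [',', ' '] ((s ++ ", " ++ x).toList :: t.map String.toList))
    congr 1
    cases t with
    | nil =>
      simp only [List.map_nil]
      rw [PySem.Chars.join_singleton, PySem.Chars.join_singleton, hx]
    | cons y tt =>
      rw [List.map_cons, PySem.Chars.join_cons_cons, PySem.Chars.join_cons_cons, ← hx]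
      simp [List.append_assoc]

-- 'prev is None' accumulator combining, used to state B's loop invariant
def pvCombine (o : Option String) (ids : List String) : Option String :=
  match o, ids with
  | o, [] => o
  | some s, l => some (l.foldl (fun a x => a ++ ", " ++ x) s)
  | none, a :: t => some (t.foldl (fun a x => a ++ ", " ++ x) a)

-- B's loop invariant: the accumulated string at a wanted key x combines the ids A filters out
theorem pv_joined_get? (refs : List (List (String × String))) (w : PySem.Set String)
    (x : String) (hx : PySem.Set.contains w x = true) (j : PySem.Dict String String) :
    (refs.foldl (fun j r =>
      match (PySem.Dict.mk r).get? "database" with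
      | none => j
      | some db =>
        if PySem.Set.contains w db then
          let rid := ((PySem.Dict.mk r).get? "id").getD ""
          match j.get? db with
          | none => j.insert db rid
          | some prev => j.insert db (prev ++ ", " ++ rid)
        else j) j).get? x
    = pvCombine (j.get? x)
        ((refs.filter (fun r => (PySem.Dict.mk r).get? "database" == some x)).map
          (fun r => ((PySem.Dict.mk r).get? "id").getD "")) := by
  induction refs generalizing j with
  | nil => cases hj : j.get? x <;> simp [pvCombine, hj]
  | cons r t ih =>
    simp only [List.foldl_cons, List.filter_cons]
    cases hdb : (PySem.Dict.mk r).get? "database" with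
    | none =>
      have hp : ((none : Option String) == some x) = false := by simp
      rw [hp]
      simp only [Bool.false_eq_true, if_false]
      exact ih j
    | some db =>
      dsimp only
      by_cases hw : PySem.Set.contains w db = true
      · rw [if_pos hw]
        by_cases hdx : db = x
        · subst hdx
          have hp : ((some db : Option String) == some db) = true := by simp
          rw [hp]
          simp only [if_true]
          cases hj : j.get? db with
          | none =>
            rw [ih, PySem.Dict.get?_insert_self]
            simp only [List.map_cons]
            cases (t.filter (fun r => (PySem.Dict.mk r).get? "database" == some db)).map
                (fun r => ((PySem.Dict.mk r).get? "id").getD "") <;>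
              simp [pvCombine]
          | some prev =>
            rw [ih, PySem.Dict.get?_insert_self]
            simp only [List.map_cons]
            cases (t.filter (fun r => (PySem.Dict.mk r).get? "database" == some db)).map
                (fun r => ((PySem.Dict.mk r).get? "id").getD "") <;>
              simp [pvCombine]
        · have hp : ((some db : Option String) == some x) = false := by simp [hdx]
          rw [hp]
          simp only [Bool.false_eq_true, if_false]
          cases hj : j.get? db with
          | none =>
            rw [ih, PySem.Dict.get?_insert_of_ne _ _ (fun h => hdx h.symm)]
          | some prev =>
            rw [ih, PySem.Dict.get?_insert_of_ne _ _ (fun h => hdx h.symm)]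
      · rw [if_neg hw]
        have hdx : db ≠ x := fun h => hw (h ▸ hx)
        have hp : ((some db : Option String) == some x) = false := by simp [hdx]
        rw [hp]
        simp only [Bool.false_eq_true, if_false]
        exact ih j

-- A's per-key value equals B's accumulated value read with default ""
theorem pv_combine_join (ids : List String) :
    (pvCombine none ids).getD "" = PySem.Str.join ", " ids := by
  cases ids with
  | nil => rfl
  | cons a t => rw [pv_join_cons]; rfl

-- B's accumulation read per requested key, against A's filter-and-map-and-join value
theorem pv_joined_getD (refs : List (List (String × String))) (crs : List String)
    (x : String) (hx : x ∈ crs) :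
    (refs.foldl (fun j r =>
      match (PySem.Dict.mk r).get? "database" with
      | none => j
      | some db =>
        if PySem.Set.contains (PySem.Set.ofList crs) db then
          let rid := ((PySem.Dict.mk r).get? "id").getD ""
          match j.get? db with
          | none => j.insert db rid
          | some prev => j.insert db (prev ++ ", " ++ rid)
        else j) PySem.Dict.empty).getD x ""
    = PySem.Str.join ", "
        ((refs.filter (fun r => (PySem.Dict.mk r).get? "database" == some x)).map
          (fun r => ((PySem.Dict.mk r).get? "id").getD "")) := by
  have hcx : PySem.Set.contains (PySem.Set.ofList crs) x = true := by
    simp [PySem.Set.mem_ofList, hx]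
  rw [PySem.Dict.getD_eq_get?_getD, pv_joined_get? refs _ x hcx, PySem.Dict.get?_empty,
    pv_combine_join]

-- ===== VERDICT (by name: the statement is the Claim_ definition above) =====
theorem extract_cross_references_spec : Claim_equal_extract_cross_references := by
  intro entry cross_references _ _
  show extract_cross_references entry cross_references = extract_cross_references_alt entry cross_references
  unfold extract_cross_references extract_cross_references_alt
  rw [pv_A_items, pv_items_foldl_insert]
  apply List.map_congr_left
  intro x hx
  rw [pv_joined_getD _ _ x ((PySem.Set.mem_ofList cross_references x).mp hx)]
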